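-- pv_equiv track=rewrite | github.com/fbaseggio/bridge-puzzle-demo | articles/ruff-or-sluff/cleanup_diagrams.py | seat_line_indices
-- ===== SOURCE A (Python) =====
-- SEATS = ("NORTH", "WEST", "EAST", "SOUTH")
--
-- def normalized_text(text: str) -> str:
--     return text.upper().replace("\u2019", "'").replace("\u2018", "'")
--
-- def seat_line_indices(lines: list[str]) -> dict[str, int]:
--     found: dict[str, int] = {}
--     for idx, line in enumerate(lines):
--         upper = normalized_text(line)
--         for seat in SEATS:
--             if seat in upper and seat not in found:
--                 found[seat] = idx
--     return found
-- ===== SOURCE B (Python) =====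
-- SEATS = ("NORTH", "WEST", "EAST", "SOUTH")
--
-- def normalized_text(text: str) -> str:
--     return text.upper().replace("\u2019", "'").replace("\u2018", "'")
--
-- def seat_line_indices(lines: list[str]) -> dict[str, int]:
--     # per-seat first-match search, then one sort restores the line/seat order
--     entries = []
--     for rank, seat in enumerate(SEATS):
--         for j, line in enumerate(lines):
--             if seat in normalized_text(line):
--                 entries.append((j, rank))
--                 break
--     entries.sort()
--     return {SEATS[rank]: j for j, rank in entries}
-- ===== Notes on version B (the rewrite author's own statement) =====
-- stated objective: alternative
-- what changed: Replaces A's single pass over lines with a 'seat not in found' guard by a per-seat first-match search followed by one sort of the (index, rank, seat) triples that restores the dict insertion order.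
import Mathlib
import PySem

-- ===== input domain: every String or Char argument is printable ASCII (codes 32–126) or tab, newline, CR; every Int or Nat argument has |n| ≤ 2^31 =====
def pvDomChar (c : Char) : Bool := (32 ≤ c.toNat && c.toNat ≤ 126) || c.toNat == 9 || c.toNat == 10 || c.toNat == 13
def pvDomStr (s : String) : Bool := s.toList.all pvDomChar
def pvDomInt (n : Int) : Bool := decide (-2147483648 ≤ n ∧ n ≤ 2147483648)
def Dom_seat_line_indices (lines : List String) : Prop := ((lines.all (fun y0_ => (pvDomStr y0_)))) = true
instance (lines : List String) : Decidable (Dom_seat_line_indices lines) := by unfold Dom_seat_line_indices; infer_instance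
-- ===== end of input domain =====

-- B replaces A's single pass over lines (with a "seat not in found" guard) by a per-seat
-- first-match search plus one sort that restores the (line, seat-rank) insertion order.

-- ===== PORT A =====
def pvSeats : List String := ["NORTH", "WEST", "EAST", "SOUTH"]

def pvNorm (t : String) : String :=
  PySem.Str.replace (PySem.Str.replace (PySem.Str.upper t) "\u2019" "'") "\u2018" "'"

def seat_line_indices (lines : List String) : List (String × Int) :=
  ((PySem.List.enumerate lines).foldl
    (fun found p =>
      let upper := pvNorm p.2
      pvSeats.foldl
        (fun found seat =>
          if PySem.Str.isIn seat upper && !found.contains seat then found.insert seat p.1 else found)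
        found)
    (PySem.Dict.empty : PySem.Dict String Int)).items

-- ===== PORT B =====
-- inner `for … break` loop of Source B: first enumerate index whose normalized line contains the seat
def pvFirstHit (seat : String) : List (Int × String) → Option Int
  | [] => none
  | p :: rest => if PySem.Str.isIn seat (pvNorm p.2) then some p.1 else pvFirstHit seat rest

def seat_line_indices_alt (lines : List String) : List (String × Int) :=
  let entries := (PySem.List.enumerate pvSeats).foldl
    (fun acc q =>
      match pvFirstHit q.2 (PySem.List.enumerate lines) with
      | some j => acc ++ [(j, q.1, q.2)]
      | none => acc)
    ([] : List (Int × Int × String))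
  -- entries.sort(): Python compares the (j, rank, seat) triples lexicographically; the
  -- seat string is determined by rank, so the lexicographic (j, rank) key is exact here
  let sortedE := PySem.List.sorted entries (fun e => toLex (e.1, e.2.1))
  (sortedE.foldl (fun d e => d.insert e.2.2 e.1) (PySem.Dict.empty : PySem.Dict String Int)).items

-- ===== PRECONDITION & SPEC =====
def Spec_seat_line_indices (lines : List String) (out : List (String × Int)) : Prop := out = seat_line_indices_alt lines
instance (lines : List String) (out : List (String × Int)) : Decidable (Spec_seat_line_indices lines out) := by unfold Spec_seat_line_indices; infer_instance

-- ===== CLAIM (what is proved, stated in full; the proofs are below) =====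
def Claim_equal_seat_line_indices : Prop := ∀ (lines : List String), Dom_seat_line_indices lines → Spec_seat_line_indices lines (seat_line_indices lines)

-- ===== LEMMAS AND PROOFS =====

-- canonical "first hits in (line index, seat rank) order", threading the set of already-found seats
def pvT (f : String → Bool) : List (Int × String) → List (Int × Int × String)
  | [] => []
  | p :: rest =>
      ((PySem.List.enumerate pvSeats).filter (fun q => PySem.Str.isIn q.2 (pvNorm p.2) && !f q.2)).map
        (fun q => (p.1, q.1, q.2))
      ++ pvT (fun s => f s || PySem.Str.isIn s (pvNorm p.2)) rest

theorem pv_inner_contains (ss : List String) (d : PySem.Dict String Int)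
    (upper : String) (i : Int) (s' : String) :
    (ss.foldl (fun d s => if PySem.Str.isIn s upper && !d.contains s then d.insert s i else d) d).contains s'
      = (d.contains s' || (ss.contains s' && PySem.Str.isIn s' upper)) := by
  induction ss generalizing d with
  | nil => simp
  | cons s rest ih =>
    simp only [List.foldl_cons]
    rw [ih]
    simp only [List.contains_cons]
    split
    · rename_i hc
      simp only [PySem.Dict.contains_insert]
      by_cases hs : s' = s <;>
        cases h1 : PySem.Str.isIn s' upper <;> cases h2 : d.contains s' <;> simp_all
    · rename_i hc
      by_cases hs : s' = s <;>
        cases h1 : PySem.Str.isIn s' upper <;> cases h2 : d.contains s' <;> simp_all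

theorem pv_inner_items (ss : List String) (d : PySem.Dict String Int)
    (upper : String) (i : Int) (hnd : ss.Nodup) :
    (ss.foldl (fun d s => if PySem.Str.isIn s upper && !d.contains s then d.insert s i else d) d).items
      = d.items ++ (ss.filter (fun s => PySem.Str.isIn s upper && !d.contains s)).map (fun s => (s, i)) := by
  induction ss generalizing d with
  | nil => simp
  | cons s rest ih =>
    simp only [List.foldl_cons, List.filter_cons]
    have hs : s ∉ rest := (List.nodup_cons.mp hnd).1
    have hnd' : rest.Nodup := (List.nodup_cons.mp hnd).2
    split
    · rename_i hc
      have hfc : rest.filter (fun a => PySem.Str.isIn a upper && !(d.insert s i).contains a)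
          = rest.filter (fun a => PySem.Str.isIn a upper && !d.contains a) := by
        refine List.filter_congr (fun a ha => ?_)
        have : a ≠ s := fun h => hs (h ▸ ha)
        have hbe : (a == s) = false := beq_eq_false_iff_ne.mpr this
        simp [PySem.Dict.contains_insert, hbe]
      rw [ih _ hnd',
        PySem.Dict.items_insert_of_not_contains d i (by revert hc; cases h : d.contains s <;> simp),
        hfc]
      simp
    · rename_i hc
      rw [ih _ hnd']

theorem pv_enum_filter_map {α β : Type} (xs : List α) (n : Int) (c : α → Bool) (g : α → β) :
    (((PySem.List.enumerate xs n).filter (fun q => c q.2)).map (fun q => g q.2))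
      = (xs.filter c).map g := by
  induction xs generalizing n with
  | nil => simp [PySem.List.enumerate_nil]
  | cons x xs ih =>
    rw [PySem.List.enumerate_cons, List.filter_cons, List.filter_cons]
    by_cases h : c x
    · simp only [h, if_pos, List.map_cons, ih]
    · simp only [h, Bool.false_eq_true]
      simp [ih]

theorem pv_firstHit_mem (s : String) (els : List (Int × String)) (j : Int)
    (h : pvFirstHit s els = some j) : ∃ p ∈ els, j = p.1 := by
  induction els with
  | nil => simp [pvFirstHit] at h
  | cons p rest ih =>
    rw [pvFirstHit] at h
    split at h
    · injection h with h
      exact ⟨p, List.mem_cons_self, h.symm⟩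
    · obtain ⟨q, hq, hj⟩ := ih h
      exact ⟨q, List.mem_cons_of_mem _ hq, hj⟩

theorem pv_mem_T (els : List (Int × String)) (f : String → Bool) (e : Int × Int × String) :
    e ∈ pvT f els ↔
      ((e.2.1, e.2.2) ∈ PySem.List.enumerate pvSeats ∧ f e.2.2 = false
        ∧ pvFirstHit e.2.2 els = some e.1) := by
  obtain ⟨j, r, s⟩ := e
  induction els generalizing f with
  | nil => simp [pvT, pvFirstHit]
  | cons p rest ih =>
    rw [pvT]
    simp only [List.mem_append, List.mem_map, List.mem_filter, ih, pvFirstHit]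
    constructor
    · rintro (⟨⟨qr, qs⟩, ⟨hq, hcond⟩, heq⟩ | ⟨hmem, hf, hfh⟩)
      · simp only [Prod.mk.injEq] at heq
        obtain ⟨h1, h2, h3⟩ := heq
        subst h2; subst h3
        obtain ⟨hit, hf⟩ := Bool.and_eq_true_iff.mp hcond
        refine ⟨hq, by simpa using hf, ?_⟩
        rw [if_pos hit, h1]
      · simp only [Bool.or_eq_false_iff] at hf
        refine ⟨hmem, hf.1, ?_⟩
        rw [if_neg (by rw [show PySem.Str.isIn s (pvNorm p.2) = false from hf.2]; simp)]
        exact hfh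
    · rintro ⟨hmem, hf, hfh⟩
      by_cases hh : PySem.Str.isIn s (pvNorm p.2)
      · rw [if_pos hh] at hfh
        injection hfh with hj
        exact Or.inl ⟨(r, s), ⟨hmem, by rw [hh, hf]; rfl⟩, by rw [hj]⟩
      · rw [if_neg hh] at hfh
        exact Or.inr ⟨hmem, by rw [hf]; simpa using hh, hfh⟩

theorem pv_pairwise_T (els : List (Int × String)) (f : String → Bool)
    (h : List.Pairwise (fun p q => p.1 < q.1) els) :
    List.Pairwise (fun a b => (toLex (a.1, a.2.1) : Lex (Int × Int)) < toLex (b.1, b.2.1)) (pvT f els) := by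
  induction els generalizing f with
  | nil => simp [pvT]
  | cons p rest ih =>
    obtain ⟨hp, hrest⟩ := List.pairwise_cons.mp h
    rw [pvT, List.pairwise_append]
    refine ⟨?_, ih _ hrest, ?_⟩
    · refine List.Pairwise.map _ (fun a b hab => ?_)
        (List.Pairwise.filter _ (PySem.List.pairwise_lt_enumerate pvSeats 0))
      exact Prod.Lex.toLex_lt_toLex.mpr (Or.inr ⟨rfl, hab⟩)
    · intro a ha b hb
      obtain ⟨q, hq, rfl⟩ := List.mem_map.mp ha
      obtain ⟨hmem, hfb, hfh⟩ := (pv_mem_T rest _ b).mp hb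
      obtain ⟨w, hw, hwj⟩ := pv_firstHit_mem _ _ _ hfh
      exact Prod.Lex.toLex_lt_toLex.mpr (Or.inl (hwj ▸ hp w hw))

theorem pv_entries_eq (els : List (Int × String)) (qs : List (Int × String))
    (acc : List (Int × Int × String)) :
    (qs.foldl
      (fun acc q =>
        match pvFirstHit q.2 els with
        | some j => acc ++ [(j, q.1, q.2)]
        | none => acc) acc)
      = acc ++ qs.filterMap (fun q => (pvFirstHit q.2 els).map (fun j => (j, q.1, q.2))) := by
  induction qs generalizing acc with
  | nil => simp
  | cons q rest ih =>
    simp only [List.foldl_cons, List.filterMap_cons]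
    cases h : pvFirstHit q.2 els with
    | none => simp [ih]
    | some j => simp [ih]

theorem pv_A_main (els : List (Int × String)) (f : String → Bool) (d : PySem.Dict String Int)
    (hd : ∀ s ∈ pvSeats, d.contains s = f s) :
    (els.foldl
      (fun found p =>
        let upper := pvNorm p.2
        pvSeats.foldl
          (fun found seat =>
            if PySem.Str.isIn seat upper && !found.contains seat then found.insert seat p.1 else found)
          found)
      d).items
      = d.items ++ (pvT f els).map (fun e => (e.2.2, e.1)) := by
  induction els generalizing f d with
  | nil => simp [pvT]
  | cons p rest ih =>
    simp only [List.foldl_cons]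
    rw [pvT]
    have hd' : ∀ s ∈ pvSeats,
        (pvSeats.foldl
          (fun found seat =>
            if PySem.Str.isIn seat (pvNorm p.2) && !found.contains seat then found.insert seat p.1 else found)
          d).contains s = (f s || PySem.Str.isIn s (pvNorm p.2)) := by
      intro s hs
      rw [pv_inner_contains, hd s hs]
      have : pvSeats.contains s = true := by simpa using hs
      rw [this]
      simp
    rw [ih _ _ hd']
    rw [pv_inner_items _ _ _ _ (by decide)]
    have hfc : pvSeats.filter (fun s => PySem.Str.isIn s (pvNorm p.2) && !d.contains s)
        = pvSeats.filter (fun s => PySem.Str.isIn s (pvNorm p.2) && !f s) := by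
      refine List.filter_congr (fun s hs => ?_)
      rw [hd s hs]
    rw [hfc]
    rw [List.map_append, List.map_map]
    have hblock : (((PySem.List.enumerate pvSeats).filter
          (fun q => PySem.Str.isIn q.2 (pvNorm p.2) && !f q.2)).map
            ((fun e => (e.2.2, e.1)) ∘ (fun q => (p.1, q.1, q.2))))
        = (pvSeats.filter (fun s => PySem.Str.isIn s (pvNorm p.2) && !f s)).map (fun s => (s, p.1)) := by
      exact pv_enum_filter_map pvSeats 0 (fun s => PySem.Str.isIn s (pvNorm p.2) && !f s) (fun s => (s, p.1))
    rw [hblock, List.append_assoc]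

theorem seat_line_indices_eq_alt (lines : List String) :
    seat_line_indices lines = seat_line_indices_alt lines := by
  unfold seat_line_indices seat_line_indices_alt
  dsimp only
  rw [pv_A_main (PySem.List.enumerate lines) (fun _ => false) PySem.Dict.empty
    (fun s _ => PySem.Dict.contains_empty s)]
  rw [pv_entries_eq]
  set E := (PySem.List.enumerate pvSeats).filterMap
    (fun q => (pvFirstHit q.2 (PySem.List.enumerate lines)).map (fun j => (j, q.1, q.2))) with hE
  set T := pvT (fun _ => false) (PySem.List.enumerate lines) with hT
  have nodupT : T.Nodup := by
    refine (pv_pairwise_T _ _ (PySem.List.pairwise_lt_enumerate lines 0)).imp ?_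
    intro a b hlt heq
    exact absurd (heq ▸ hlt) (lt_irrefl _)
  have nodupE : E.Nodup := by
    refine List.Nodup.filterMap ?_ (by decide)
    intro q q' b hb hb'
    cases hj : pvFirstHit q.2 (PySem.List.enumerate lines) with
    | none => rw [hj] at hb; simp at hb
    | some j =>
      rw [hj] at hb; simp only [Option.map_some, Option.mem_def, Option.some.injEq] at hb
      cases hj' : pvFirstHit q'.2 (PySem.List.enumerate lines) with
      | none => rw [hj'] at hb'; simp at hb'
      | some j' =>
        rw [hj'] at hb'; simp only [Option.map_some, Option.mem_def, Option.some.injEq] at hb'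
        have h1 : q.1 = b.2.1 ∧ q.2 = b.2.2 := by rw [← hb]; exact ⟨rfl, rfl⟩
        have h2 : q'.1 = b.2.1 ∧ q'.2 = b.2.2 := by rw [← hb']; exact ⟨rfl, rfl⟩
        have hq : q = (b.2.1, b.2.2) := by rw [← h1.1, ← h1.2]
        have hq' : q' = (b.2.1, b.2.2) := by rw [← h2.1, ← h2.2]
        rw [hq, hq']
  have memE : ∀ e, e ∈ E ↔ ((e.2.1, e.2.2) ∈ PySem.List.enumerate pvSeats
      ∧ pvFirstHit e.2.2 (PySem.List.enumerate lines) = some e.1) := by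
    intro e
    rw [hE, List.mem_filterMap]
    constructor
    · rintro ⟨q, hq, hg⟩
      cases hj : pvFirstHit q.2 (PySem.List.enumerate lines) with
      | none => rw [hj] at hg; simp at hg
      | some j =>
        rw [hj] at hg
        simp only [Option.map_some, Option.some.injEq] at hg
        rw [← hg]
        exact ⟨by simpa using hq, by simpa using hj⟩
    · rintro ⟨hmem, hfh⟩
      refine ⟨(e.2.1, e.2.2), hmem, ?_⟩
      rw [hfh]
      rfl
  have hperm : T.Perm E := by
    refine (List.perm_ext_iff_of_nodup nodupT nodupE).mpr (fun e => ?_)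
    rw [hT, pv_mem_T, memE]
    simp
  have hsorted : PySem.List.sorted E (fun e => toLex (e.1, e.2.1)) = T :=
    PySem.List.sorted_eq_of_perm_of_pairwise_lt E T _ hperm
      (pv_pairwise_T _ _ (PySem.List.pairwise_lt_enumerate lines 0))
  rw [List.nil_append, hsorted]
  have hknodup : (T.map (fun e => e.2.2)).Nodup := by
    refine List.Nodup.map_on ?_ nodupT
    intro x hx y hy hss
    obtain ⟨hmx, _, hfx⟩ := (pv_mem_T _ _ x).mp (hT ▸ hx)
    obtain ⟨hmy, _, hfy⟩ := (pv_mem_T _ _ y).mp (hT ▸ hy)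
    obtain ⟨k, hk, hxe⟩ := (PySem.List.mem_enumerate_iff _ _ _).mp hmx
    obtain ⟨k', hk', hye⟩ := (PySem.List.mem_enumerate_iff _ _ _).mp hmy
    simp only [Prod.mk.injEq] at hxe hye
    have hkk : k = k' := by
      refine (List.Nodup.getElem_inj_iff (by decide : pvSeats.Nodup) (hi := hk) (hj := hk')).mp ?_
      rw [← hxe.2, ← hye.2, hss]
    have h21 : x.2.1 = y.2.1 := by rw [hxe.1, hye.1, hkk]
    have h1 : x.1 = y.1 := by
      rw [hss] at hfx
      rw [hfx] at hfy
      injection hfy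
    obtain ⟨x1, x2, x3⟩ := x
    obtain ⟨y1, y2, y3⟩ := y
    simp_all
  rw [PySem.Dict.items_foldl_insert_fresh T (fun e => e.2.2) (fun e => e.1) PySem.Dict.empty
    (fun a _ => PySem.Dict.contains_empty _) hknodup]

-- ===== VERDICT (by name: the statement is the Claim_ definition above) =====
theorem seat_line_indices_spec : Claim_equal_seat_line_indices := by
  intro lines _
  unfold Spec_seat_line_indices
  exact seat_line_indices_eq_alt lines
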